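-- pv_equiv track=rewrite | github.com/jskaf34/TLNL-Projects | TP1_Mendizabal_Skaf/TP1_codes/genere.py | generate_sentence_bigram
-- ===== SOURCE A (Python) =====
-- def generate_sentence_bigram(sorted_word_dict, sentence, d): #fonction récursive
--     """
--     Paramètres :
--     sorted_word_dict = modèle bigram, sous forme de dictionnaire trié par ordre décroissant de fréquence d'apparition
--     sentence = début de la phrase générée à compléter
--     d = nombre de mots désirés dans la phrase générée
--
--     Output :
--     liste des d mots de la phrase générée avec modèle unigram
--     """
--
--     if d == 1: #condition intiale
--         return sentence
--
--     new_word = sentence[-1] #dernier mot ajouté à la phrase, utile pour trouver le prochain si elle est encore incomplète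
--     found = False
--     for (m1, m2), v in sorted_word_dict.items() :
--         if m1 == new_word and m2 not in sentence: #on évite de rajouter le même mot en boucle
--             sentence.append(m2)
--             del sorted_word_dict[(m1, m2)]
--             found = True
--             break
--
--     if found :
--         return generate_sentence_bigram(sorted_word_dict, sentence, d-1) #nouveau mot ajouté, on continue en diminuant le nb de mots nécessaires
--
--     else : #pas de correspondance entre le dernier mot de la phrase incomplète et les bigrams. On ajoute donc un mot au hasard avec bonne probabilité.
--         for (m1, m2), v in sorted_word_dict.items() :
--             if m2 not in sentence:
--                 sentence.append(m2)
--                 del sorted_word_dict[(m1, m2)]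
--                 return generate_sentence_bigram(sorted_word_dict, sentence, d-1)
-- ===== SOURCE B (Python) =====
-- # B: iterative; maintains a single pruned candidate list (entries whose m2 is already
-- # in the sentence are dropped for good), so the fallback is just the head of the list
-- # and deletion becomes one bulk filter per added word.
-- # Note: A mutates `sentence` and `sorted_word_dict` in place; B does not -- the
-- # equivalence claimed is about the return value only.
-- def generate_sentence_bigram(sorted_word_dict, sentence, d):
--     out = list(sentence)
--     remaining = [(m1, m2) for (m1, m2) in sorted_word_dict if m2 not in out]
--     while d != 1:
--         last = out[-1]
--         pick = next((e for e in remaining if e[0] == last), None)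
--         if pick is None:
--             if not remaining:
--                 return None
--             pick = remaining[0]
--         w = pick[1]
--         out.append(w)
--         remaining = [e for e in remaining if e[1] != w]
--         d -= 1
--     return out
-- ===== Notes on version B (the rewrite author's own statement) =====
-- stated objective: alternative
-- what changed: B replaces A's recursion with two scan-and-delete passes over the full dict by an iterative loop over a single eagerly pruned candidate list (entries whose second word is already in the sentence are dropped once and for all), so the fallback pass becomes taking the head of the list and per-step deletion becomes one bulk filter; B trades A's early exits for never rescanning dead entries.
import Mathlib
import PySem

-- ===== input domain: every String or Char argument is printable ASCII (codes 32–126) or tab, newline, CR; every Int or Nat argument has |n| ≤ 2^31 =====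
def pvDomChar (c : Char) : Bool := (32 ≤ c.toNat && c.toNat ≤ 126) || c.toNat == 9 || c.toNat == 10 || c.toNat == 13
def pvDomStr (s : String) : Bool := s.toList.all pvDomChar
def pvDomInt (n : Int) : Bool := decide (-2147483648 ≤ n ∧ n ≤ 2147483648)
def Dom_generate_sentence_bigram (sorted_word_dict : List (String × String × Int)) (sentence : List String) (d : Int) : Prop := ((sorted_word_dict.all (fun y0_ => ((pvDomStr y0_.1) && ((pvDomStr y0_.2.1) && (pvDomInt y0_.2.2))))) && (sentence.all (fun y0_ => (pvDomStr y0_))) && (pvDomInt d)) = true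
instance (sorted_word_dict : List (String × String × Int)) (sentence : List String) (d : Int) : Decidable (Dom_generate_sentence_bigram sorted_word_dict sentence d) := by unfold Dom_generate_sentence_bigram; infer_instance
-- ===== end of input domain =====

-- B replaces A's recursive double scan-and-delete over the dict by an iterative loop over a
-- single pruned candidate list (alternative algorithm, same cost).  A mutates `sentence` and the dict in
-- place; the equivalence proved here is about the RETURN value only.

-- termination helper for both ports (cited by name in decreasing_by)
theorem pv_len_eraseP_lt {α : Type} (l : List α) (p : α → Bool) (a : α)
    (h : a ∈ l) (hp : p a = true) : (l.eraseP p).length < l.length := by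
  have := List.length_eraseP_add_one h hp; omega

theorem pv_len_filter_lt {α : Type} (l : List α) (p : α → Bool) (a : α)
    (h : a ∈ l) (hp : p a = false) : (l.filter p).length < l.length := by
  have h1 : (l.filter p).length ≤ l.length := List.length_filter_le ..
  rcases lt_or_eq_of_le h1 with h2 | h2
  · exact h2
  · exact absurd ((List.length_filter_eq_length_iff.mp h2) a h) (by simp [hp])

-- ===== PORT A =====
-- Transliteration of A: the dict argument arrives as an association list; A's loops over
-- `sorted_word_dict.items()` become `find?` (first match + break / return-in-loop), and
-- `del sorted_word_dict[(m1, m2)]` becomes `eraseP` of that key's first occurrence (values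
-- are never read, so collapsing duplicate keys as Python's dict constructor does is
-- observationally identical).  `sentence[-1]` is PySem.List.pyGet? sentence (-1); the
-- `none` branch is Python's IndexError, excluded by Pre_.
def generate_sentence_bigram (sorted_word_dict : List (String × String × Int)) (sentence : List String) (d : Int) : Option (List String) :=
  if d = 1 then some sentence
  else
    match PySem.List.pyGet? sentence (-1) with
    | none => none   -- Python raises IndexError here (excluded by Pre_)
    | some new_word =>
      match h1 : sorted_word_dict.find? (fun e => e.1 == new_word && !(sentence.contains e.2.1)) with
      | some e =>
          generate_sentence_bigram
            (sorted_word_dict.eraseP (fun x => x.1 == e.1 && x.2.1 == e.2.1))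
            (sentence ++ [e.2.1]) (d - 1)
      | none =>
        match h2 : sorted_word_dict.find? (fun e => !(sentence.contains e.2.1)) with
        | some e =>
            generate_sentence_bigram
              (sorted_word_dict.eraseP (fun x => x.1 == e.1 && x.2.1 == e.2.1))
              (sentence ++ [e.2.1]) (d - 1)
        | none => none
termination_by sorted_word_dict.length
decreasing_by
  · exact pv_len_eraseP_lt _ _ e (List.mem_of_find?_eq_some h1) (by simp)
  · exact pv_len_eraseP_lt _ _ e (List.mem_of_find?_eq_some h2) (by simp)

-- ===== PORT B =====
-- Transliteration of Source B's while-loop as recursion on the loop state (remaining, out, d);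
-- `out[-1]` is PySem.List.pyGet? out (-1) as in A's port.
def pvGenB_loop (remaining : List (String × String)) (out : List String) (d : Int) : Option (List String) :=
  if d = 1 then some out
  else
    match PySem.List.pyGet? out (-1) with
    | none => none   -- Python raises IndexError here (excluded by Pre_)
    | some last =>
      match hp : (match remaining.find? (fun e => e.1 == last) with
                  | some e => some e
                  | none => remaining.head?) with
      | none => none
      | some pick =>
          pvGenB_loop (remaining.filter (fun e => e.2 != pick.2)) (out ++ [pick.2]) (d - 1)
termination_by remaining.length
decreasing_by
  · rw [List.length_unattach]
    have hmem : pick ∈ remaining := by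
      split at hp
      · next e h =>
        cases hp
        exact List.mem_of_find?_eq_some h
      · exact List.mem_of_mem_head? hp
    have hlt := pv_len_filter_lt remaining.attach (fun x => x.val.2 != pick.2) ⟨pick, hmem⟩
      (List.mem_attach _ _) (bne_self_eq_false _)
    simpa using hlt

def generate_sentence_bigram_alt (sorted_word_dict : List (String × String × Int)) (sentence : List String) (d : Int) : Option (List String) :=
  pvGenB_loop
    ((sorted_word_dict.map (fun e => (e.1, e.2.1))).filter (fun e => !(sentence.contains e.2)))
    sentence d

-- ===== PRECONDITION & SPEC =====
-- Pre_ excludes exactly the inputs on which Python A raises IndexError at `sentence[-1]`: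
-- an empty starting sentence with d ≠ 1.
def Pre_generate_sentence_bigram (_sorted_word_dict : List (String × String × Int)) (sentence : List String) (d : Int) : Prop :=
  d = 1 ∨ sentence ≠ []
instance (sorted_word_dict : List (String × String × Int)) (sentence : List String) (d : Int) : Decidable (Pre_generate_sentence_bigram sorted_word_dict sentence d) := by unfold Pre_generate_sentence_bigram; infer_instance

def pvWitness_generate_sentence_bigram : (List (String × String × Int)) × List String × Int :=
  ([("the", "cat", 3), ("cat", "sat", 2), ("a", "dog", 1)], ["the"], 3)

def Spec_generate_sentence_bigram (sorted_word_dict : List (String × String × Int)) (sentence : List String) (d : Int) (out : Option (List String)) : Prop := out = generate_sentence_bigram_alt sorted_word_dict sentence d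
instance (sorted_word_dict : List (String × String × Int)) (sentence : List String) (d : Int) (out : Option (List String)) : Decidable (Spec_generate_sentence_bigram sorted_word_dict sentence d out) := by unfold Spec_generate_sentence_bigram; infer_instance

-- ===== CLAIM (what is proved, stated in full; the proofs are below) =====
def Claim_equal_generate_sentence_bigram : Prop := ∀ (sorted_word_dict : List (String × String × Int)) (sentence : List String) (d : Int), Dom_generate_sentence_bigram sorted_word_dict sentence d → Pre_generate_sentence_bigram sorted_word_dict sentence d → Spec_generate_sentence_bigram sorted_word_dict sentence d (generate_sentence_bigram sorted_word_dict sentence d)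

-- ===== LEMMAS AND PROOFS =====

-- find? on B's projected-and-pruned list = find? on the raw dict with A's conjoined predicate
theorem pv_find?_filter_map (dict : List (String × String × Int)) (p q : String × String → Bool) :
    ((dict.map (fun e => (e.1, e.2.1))).filter q).find? p
      = (dict.find? (fun e => p (e.1, e.2.1) && q (e.1, e.2.1))).map (fun e => (e.1, e.2.1)) := by
  induction dict with
  | nil => rfl
  | cons a l ih =>
    by_cases hq : q (a.1, a.2.1)
    · by_cases hp : p (a.1, a.2.1)
      · simp [hq, hp]
      · simp only [List.map_cons, List.filter_cons, hq, if_true, List.find?_cons]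
        simp [hp, ih]
    · simp only [List.map_cons, List.filter_cons, hq]
      simp [hq, ih]

-- membership in (sentence ++ [w]) as a boolean, pointwise
theorem pv_contains_append_singleton (l : List String) (w y : String) :
    (!(l ++ [w]).contains y) = (!l.contains y && y != w) := by
  cases hc : l.contains y <;> cases hw : y == w <;> simp_all [bne]

-- erasing an element the filter drops anyway does not change the filtered projection
theorem pv_eraseP_map_filter (l : List (String × String × Int)) (r : String × String × Int → Bool)
    (p : String × String → Bool) (h : ∀ x, r x = true → p (x.1, x.2.1) = false) :
    ((l.eraseP r).map (fun e => (e.1, e.2.1))).filter p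
      = (l.map (fun e => (e.1, e.2.1))).filter p := by
  induction l with
  | nil => rfl
  | cons a l ih =>
    by_cases hr : r a
    · simp [hr, h a hr]
    · simp only [List.eraseP_cons, hr, cond_false, List.map_cons, List.filter_cons]
      rw [ih]

-- the recursive call's candidate list: B's bulk filter equals A's eraseP re-projected
theorem pv_step_eq (dict : List (String × String × Int)) (sentence : List String) (e : String × String × Int) :
    ((dict.eraseP (fun x => x.1 == e.1 && x.2.1 == e.2.1)).map (fun x => (x.1, x.2.1))).filter
        (fun x => !((sentence ++ [e.2.1]).contains x.2))
      = (((dict.map (fun x => (x.1, x.2.1))).filter (fun x => !(sentence.contains x.2))).filter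
          (fun x => x.2 != e.2.1)) := by
  rw [pv_eraseP_map_filter]
  · rw [List.filter_filter]
    apply List.filter_congr
    intro x _
    rw [pv_contains_append_singleton, Bool.and_comm]
  · intro x hx
    simp only [Bool.and_eq_true, beq_iff_eq] at hx
    simp [hx.2]

-- main equivalence, by strong induction on the dict length
theorem pv_main (n : Nat) : ∀ (dict : List (String × String × Int)) (sentence : List String) (d : Int),
    dict.length ≤ n →
    generate_sentence_bigram dict sentence d
      = pvGenB_loop ((dict.map (fun e => (e.1, e.2.1))).filter (fun e => !(sentence.contains e.2))) sentence d := by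
  induction n with
  | zero =>
    intro dict sentence d hlen
    have hd : dict = [] := List.eq_nil_of_length_eq_zero (Nat.le_zero.mp hlen)
    subst hd
    rw [generate_sentence_bigram, pvGenB_loop]
    cases PySem.List.pyGet? sentence (-1) <;> simp
  | succ n ih =>
    intro dict sentence d hlen
    rw [generate_sentence_bigram, pvGenB_loop]
    by_cases hd : d = 1
    · simp [hd]
    simp only [hd, if_false]
    cases hget : PySem.List.pyGet? sentence (-1) with
    | none => rfl
    | some w =>
      have hfind1 := pv_find?_filter_map dict (fun x => x.1 == w) (fun x => !(sentence.contains x.2))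
      have hhead : ((dict.map (fun e => (e.1, e.2.1))).filter (fun e => !(sentence.contains e.2))).head?
          = (dict.find? (fun e => !(sentence.contains e.2.1))).map (fun e => (e.1, e.2.1)) := by
        rw [List.head?_filter, List.find?_map]; rfl
      split
      · -- unreachable arm (pyGet? is some w); both sides reduce to none
        rfl
      · rename_i x nw h1
        injection h1 with h1
        subst h1
        split
        · -- A's primary scan found e
          next e h2 =>
          split
          · next hp =>
            rw [hfind1, h2] at hp
            simp at hp
          · next pick hp =>
            rw [hfind1, h2] at hp
            simp only [Option.map_some] at hp
            cases hp
            have hrec := ih (dict.eraseP (fun x => x.1 == e.1 && x.2.1 == e.2.1)) (sentence ++ [e.2.1]) (d - 1)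
              (by
                have := pv_len_eraseP_lt dict (fun x => x.1 == e.1 && x.2.1 == e.2.1) e
                  (List.mem_of_find?_eq_some h2) (by simp)
                omega)
            rw [hrec, pv_step_eq]
        · -- primary scan empty: A's fallback scan
          next h2 =>
          split
          · next e h3 =>
            split
            · next hp =>
              rw [hfind1, h2, hhead, h3] at hp
              simp at hp
            · next pick hp =>
              rw [hfind1, h2, hhead, h3] at hp
              simp only [Option.map_none, Option.map_some] at hp
              cases hp
              have hrec := ih (dict.eraseP (fun x => x.1 == e.1 && x.2.1 == e.2.1)) (sentence ++ [e.2.1]) (d - 1)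
                (by
                  have := pv_len_eraseP_lt dict (fun x => x.1 == e.1 && x.2.1 == e.2.1) e
                    (List.mem_of_find?_eq_some h3) (by simp)
                  omega)
              rw [hrec, pv_step_eq]
          · -- both scans failed: both return none
            next h3 =>
            split
            · rfl
            · next pick hp =>
              rw [hfind1, h2, hhead, h3] at hp
              simp at hp

-- ===== VERDICT (by name: the statement is the Claim_ definition above) =====
theorem generate_sentence_bigram_spec : Claim_equal_generate_sentence_bigram := by
  intro dict sentence d _ _
  unfold Spec_generate_sentence_bigram generate_sentence_bigram_alt
  exact pv_main dict.length dict sentence d le_rfl
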